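-- pv_equiv track=rewrite | github.com/Arnad1/Domaci1-strukture-podataka | 1p.py | neg_djeljivi
-- ===== SOURCE A (Python) =====
-- def neg_djeljivi(lista):
--     if len(lista) == 0:
--         return 0
--     else:
--         if lista[0] < 0 and lista[0] % 2 == 0:
--             return 1 + neg_djeljivi(lista[1:])
--         else:
--             return 0 + neg_djeljivi(lista[1:])
-- ===== SOURCE B (Python) =====
-- def neg_djeljivi(lista):
--     count = 0
--     for x in lista:
--         if x < 0 and x % 2 == 0:
--             count += 1
--     return count
-- ===== Notes on version B (the rewrite author's own statement) =====
-- stated objective: faster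
-- what changed: Replaces the linear recursion that copies the tail slice lista[1:] at each step with a single flat for-loop maintaining a count accumulator.
import Mathlib
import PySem

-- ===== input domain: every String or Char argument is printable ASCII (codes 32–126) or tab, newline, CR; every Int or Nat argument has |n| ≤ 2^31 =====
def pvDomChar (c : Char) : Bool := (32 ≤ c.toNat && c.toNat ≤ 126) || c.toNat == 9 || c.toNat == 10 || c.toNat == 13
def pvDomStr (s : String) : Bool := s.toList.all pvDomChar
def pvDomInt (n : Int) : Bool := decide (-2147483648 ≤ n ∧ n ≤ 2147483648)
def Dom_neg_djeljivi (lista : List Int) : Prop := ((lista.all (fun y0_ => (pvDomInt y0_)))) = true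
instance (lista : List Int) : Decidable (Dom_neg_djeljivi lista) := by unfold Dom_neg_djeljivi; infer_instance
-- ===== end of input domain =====

-- B replaces A's tail-slicing recursion with a single flat loop over the list keeping a count accumulator (simpler).

-- ===== PORT A =====
def neg_djeljivi (lista : List Int) : Int :=
  match lista with
  | [] => 0
  | x :: rest =>
      if x < 0 ∧ PySem.Int.mod x 2 = 0 then 1 + neg_djeljivi rest
      else 0 + neg_djeljivi rest

-- ===== PORT B =====
def neg_djeljivi_alt (lista : List Int) : Int :=
  lista.foldl (fun count x => if x < 0 ∧ PySem.Int.mod x 2 = 0 then count + 1 else count) 0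

-- ===== PRECONDITION & SPEC =====
def Spec_neg_djeljivi (lista : List Int) (out : Int) : Prop := out = neg_djeljivi_alt lista
instance (lista : List Int) (out : Int) : Decidable (Spec_neg_djeljivi lista out) := by unfold Spec_neg_djeljivi; infer_instance

-- ===== CLAIM (what is proved, stated in full; the proofs are below) =====
def Claim_equal_neg_djeljivi : Prop := ∀ (lista : List Int), Dom_neg_djeljivi lista → Spec_neg_djeljivi lista (neg_djeljivi lista)

-- ===== LEMMAS AND PROOFS =====
theorem foldl_count_eq (lista : List Int) (acc : Int) :
    lista.foldl (fun count x => if x < 0 ∧ PySem.Int.mod x 2 = 0 then count + 1 else count) acc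
      = acc + neg_djeljivi lista := by
  induction lista generalizing acc with
  | nil => simp [neg_djeljivi]
  | cons x rest ih =>
      simp only [List.foldl_cons, neg_djeljivi]
      split_ifs with h <;> rw [ih] <;> ring

-- ===== VERDICT (by name: the statement is the Claim_ definition above) =====
theorem neg_djeljivi_spec : Claim_equal_neg_djeljivi := by
  intro lista _
  unfold Spec_neg_djeljivi neg_djeljivi_alt
  rw [foldl_count_eq]
  ring
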